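-- pv_equiv track=rewrite | github.com/l-winston/minirush | puzzle_generation/scripts/crossword_utils.py | has_duplicate_word
-- ===== SOURCE A (Python) =====
-- def has_duplicate_word(grid):
--     """
--     Returns True if the given crossword grid has any duplicate word in its rows or columns.
--     Each crossword is assumed to be a square 2D list of single-character strings.
--     """
--     n = len(grid)
--     seen = set()
--     # Check rows
--     for row in grid:
--         word = ''.join(row)
--         if word in seen:
--             return True
--         seen.add(word)
--     # Check columns
--     for col_idx in range(n):
--         word = ''.join(grid[row_idx][col_idx] for row_idx in range(n))
--         if word in seen:
--             return True
--         seen.add(word)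
--     return False
-- ===== SOURCE B (Python) =====
-- def has_duplicate_word(grid):
--     n = len(grid)
--     rows = [''.join(r) for r in grid]
--     cols = [''.join(c) for c in zip(*grid)][:n]
--     words = sorted(rows + cols)
--     for a, b in zip(words, words[1:]):
--         if a == b:
--             return True
--     return False
-- ===== Notes on version B (the rewrite author's own statement) =====
-- stated objective: alternative
-- what changed: B uses no set at all: it materialises the row words and the zip(*grid) column words, sorts the whole word list, and detects a duplicate by one linear scan for an equal adjacent pair, instead of A's incremental seen-set membership loops with early return.
-- outside the precondition, e.g. on has_duplicate_word([['x', 'a'], ['a']]): A returns True, B returns True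
import Mathlib
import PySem

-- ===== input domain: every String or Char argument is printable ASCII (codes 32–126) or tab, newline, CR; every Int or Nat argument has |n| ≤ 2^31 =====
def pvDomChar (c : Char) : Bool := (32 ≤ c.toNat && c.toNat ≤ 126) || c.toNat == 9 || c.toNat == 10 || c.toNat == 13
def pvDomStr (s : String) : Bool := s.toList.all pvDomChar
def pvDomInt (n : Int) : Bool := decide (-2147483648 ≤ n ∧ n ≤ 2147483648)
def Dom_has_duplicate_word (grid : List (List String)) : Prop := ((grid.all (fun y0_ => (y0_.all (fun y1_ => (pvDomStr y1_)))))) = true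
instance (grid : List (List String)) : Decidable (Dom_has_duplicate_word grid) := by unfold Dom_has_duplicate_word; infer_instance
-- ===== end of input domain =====

-- B drops the set entirely: it builds all row words and the zip(*grid) column words, sorts the
-- combined word list, and finds a duplicate as an equal adjacent pair in one scan.
-- Objective: alternative algorithm (sort-then-scan instead of incremental set membership).

-- ===== PORT A =====
-- the body shared by A's two loops: scan words, early-return True on a word already seen
def hdwLoop (words : List String) (seen : PySem.Set String) : Bool × PySem.Set String :=
  match words with
  | [] => (false, seen)
  | w :: t =>
    if PySem.Set.contains seen w then (true, seen)
    else hdwLoop t (PySem.Set.add seen w)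

def has_duplicate_word (grid : List (List String)) : Bool :=
  let n : Int := grid.length
  -- rows phase
  let r := hdwLoop (grid.map (fun row => PySem.Str.join "" row)) PySem.Set.empty
  if r.1 then true
  else
    -- columns phase, over the seen set left by the rows phase
    (hdwLoop ((PySem.List.pyRange 0 n 1).map (fun c =>
        PySem.Str.join "" ((PySem.List.pyRange 0 n 1).map (fun ri =>
          PySem.List.pyGetD (PySem.List.pyGetD grid ri []) c "")))) r.2).1

-- ===== PORT B =====
-- [''.join(c) for c in zip(*grid)] : columns up to the shortest row (zip truncates)
def zipStarJoin (grid : List (List String)) : List String :=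
  let m := ((grid.map List.length).min?).getD 0
  (List.range m).map (fun i => PySem.Str.join "" (grid.map (fun r => r.getD i "")))

-- 'for a, b in zip(words, words[1:]): if a == b: return True' / 'return False'
def adjScan (ps : List (String × String)) : Bool :=
  match ps with
  | [] => false
  | (a, b) :: t => if a == b then true else adjScan t

def has_duplicate_word_alt (grid : List (List String)) : Bool :=
  let rows := grid.map (fun r => PySem.Str.join "" r)
  let cols := (zipStarJoin grid).take grid.length
  let words := PySem.List.sorted (rows ++ cols) (fun w => w) false
  adjScan (words.zip (words.drop 1))

-- ===== PRECONDITION & SPEC =====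
-- Pre_ excludes grids whose row words are all distinct but some row is shorter than the grid:
-- there A's column phase raises IndexError unless it happens to meet a duplicate column word
-- first, an outcome tied to A's scan order (on those early-duplicate cases A and B both return
-- True, but on the rest A raises while B returns a value).
def Pre_has_duplicate_word (grid : List (List String)) : Prop :=
  ¬ (grid.map (fun r => PySem.Str.join "" r)).Nodup ∨ ∀ r ∈ grid, grid.length ≤ r.length
instance (grid : List (List String)) : Decidable (Pre_has_duplicate_word grid) := by
  unfold Pre_has_duplicate_word; infer_instance

def pvWitness_has_duplicate_word : List (List String) := [["a", "b"], ["c", "d"]]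

def Spec_has_duplicate_word (grid : List (List String)) (out : Bool) : Prop := out = has_duplicate_word_alt grid
instance (grid : List (List String)) (out : Bool) : Decidable (Spec_has_duplicate_word grid out) := by unfold Spec_has_duplicate_word; infer_instance

-- ===== CLAIM (what is proved, stated in full; the proofs are below) =====
def Claim_equal_has_duplicate_word : Prop := ∀ (grid : List (List String)), Dom_has_duplicate_word grid → Pre_has_duplicate_word grid → Spec_has_duplicate_word grid (has_duplicate_word grid)

-- ===== LEMMAS AND PROOFS =====

-- running A's loop over a concatenation = running it over the two parts, threading found/seen
lemma hdwLoop_append (ws1 ws2 : List String) (seen : PySem.Set String) :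
    hdwLoop (ws1 ++ ws2) seen =
      (let r := hdwLoop ws1 seen; if r.1 then r else hdwLoop ws2 r.2) := by
  induction ws1 generalizing seen with
  | nil => simp [hdwLoop]
  | cons w t ih =>
    simp only [List.cons_append, hdwLoop]
    split
    · rfl
    · exact ih _

-- A's loop finds a duplicate iff the word list (together with the incoming seen set) is not fresh
lemma hdwLoop_fst (ws : List String) (seen : PySem.Set String) :
    (hdwLoop ws seen).1 = !decide (ws.Nodup ∧ ∀ w ∈ ws, w ∉ seen) := by
  induction ws generalizing seen with
  | nil => simp [hdwLoop]
  | cons w t ih =>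
    simp only [hdwLoop]
    by_cases hw : w ∈ seen
    · simp [hw]
    · have hc : PySem.Set.contains seen w = false := by
        simpa using (fun h => hw ((PySem.Set.contains_iff _ _).1 h))
      rw [hc]
      simp only [if_neg Bool.false_ne_true, ih]
      congr 1
      simp only [decide_eq_decide, List.nodup_cons, List.mem_cons, PySem.Set.mem_add]
      constructor
      · rintro ⟨hn, hfresh⟩
        refine ⟨⟨fun hwt => (hfresh w hwt) (Or.inr rfl), hn⟩, ?_⟩
        rintro x (rfl | hx)
        · exact hw
        · exact fun hs => hfresh x hx (Or.inl hs)
      · rintro ⟨⟨hwt, hn⟩, hfresh⟩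
        refine ⟨hn, fun x hx h => ?_⟩
        rcases h with h | rfl
        · exact hfresh x (Or.inr hx) h
        · exact hwt hx

-- on a ≤-sorted list, the adjacent-pair scan is exactly the not-Nodup test
lemma adjScan_sorted (ws : List String) (h : ws.Pairwise (fun a b => a ≤ b)) :
    adjScan (ws.zip (ws.drop 1)) = !decide ws.Nodup := by
  induction ws with
  | nil => simp [adjScan]
  | cons a t ih =>
    cases t with
    | nil => simp [adjScan]
    | cons b t2 =>
      have hab : a ≤ b := (List.pairwise_cons.1 h).1 b (by simp)
      have hat : ∀ x ∈ t2, a ≤ x := fun x hx => (List.pairwise_cons.1 h).1 x (by simp [hx])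
      have ht : (b :: t2).Pairwise (fun a b => a ≤ b) := (List.pairwise_cons.1 h).2
      have hbt : ∀ x ∈ t2, b ≤ x := (List.pairwise_cons.1 ht).1
      simp only [List.drop_succ_cons, List.drop_zero, List.zip_cons_cons, adjScan]
      by_cases he : a = b
      · subst he
        simp [List.nodup_cons]
      · have hbeq : (a == b) = false := by simpa using he
        rw [hbeq]
        simp only [if_neg Bool.false_ne_true]
        have := ih ht
        simp only [List.drop_succ_cons, List.drop_zero] at this
        rw [this]
        have hnotin : a ∉ b :: t2 := by
          intro hmem
          rcases List.mem_cons.1 hmem with rfl | hx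
          · exact he rfl
          · exact he (le_antisymm hab (hbt a hx))
        congr 1
        simp [List.nodup_cons, hnotin]

-- indexing a list over range of its length is mapping over it
lemma map_range_getD {α β : Type} (l : List α) (d : α) (f : α → β) :
    (List.range l.length).map (fun i => f (l.getD i d)) = l.map f := by
  apply List.ext_getElem
  · simp
  · intro i h1 h2
    have h1' : i < l.length := by simpa using h1
    simp [List.getElem?_eq_getElem h1']

-- under squareness, B's zip-columns are A's index-columns
lemma cols_eq (grid : List (List String)) (h : ∀ r ∈ grid, grid.length ≤ r.length) :
    (PySem.List.pyRange 0 (grid.length : Int) 1).map (fun c =>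
        PySem.Str.join "" ((PySem.List.pyRange 0 (grid.length : Int) 1).map (fun ri =>
          PySem.List.pyGetD (PySem.List.pyGetD grid ri []) c ""))) = (zipStarJoin grid).take grid.length := by
  unfold zipStarJoin
  by_cases hg : grid = []
  · subst hg; simp [PySem.List.pyRange]
  · obtain ⟨k, hk⟩ : ∃ k, (grid.map List.length).min? = some k := by
      cases hmin : (grid.map List.length).min? with
      | none => exact absurd (List.min?_eq_none_iff.1 hmin) (by simpa using hg)
      | some k => exact ⟨k, rfl⟩
    have hkmem : k ∈ grid.map List.length := List.min?_mem hk
    have hnk : grid.length ≤ k := by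
      rcases List.mem_map.1 hkmem with ⟨r, hr, rfl⟩
      exact h r hr
    rw [hk]
    simp only [Option.getD_some, ← List.map_take, List.take_range, Nat.min_eq_left hnk]
    rw [PySem.List.pyRange_zero_nat]
    simp only [List.map_map]
    refine List.map_congr_left fun c hc => ?_
    simp only [Function.comp_apply]
    have harg : (List.range grid.length).map
        ((fun ri : Int => PySem.List.pyGetD (PySem.List.pyGetD grid ri []) (c : Int) "") ∘ (fun k : Nat => (k : Int)))
        = grid.map (fun r => r.getD c "") := by
      simp only [Function.comp_def, PySem.List.pyGetD_natCast]
      exact map_range_getD grid [] (fun r => r.getD c "")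
    rw [harg]

-- A's two-phase loop over rows then columns is the not-Nodup test on the concatenation
lemma A_eq (rows cols : List String) :
    (if (hdwLoop rows PySem.Set.empty).1 then true
     else (hdwLoop cols (hdwLoop rows PySem.Set.empty).2).1)
    = !decide ((rows ++ cols).Nodup) := by
  have hfst : (hdwLoop (rows ++ cols) PySem.Set.empty).1 = !decide ((rows ++ cols).Nodup) := by
    rw [hdwLoop_fst]
    simp [PySem.Set.empty]
  rw [← hfst, hdwLoop_append]
  simp only [PySem.Set.empty]
  cases hf : (hdwLoop rows []).1 <;> simp [hf]

-- B's sort-then-scan is the not-Nodup test on the word list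
lemma B_eq (words : List String) :
    adjScan ((PySem.List.sorted words (fun w => w) false).zip
             ((PySem.List.sorted words (fun w => w) false).drop 1)) = !decide words.Nodup := by
  have hperm := PySem.List.sorted_perm words (fun w => w) false
  have hpw : (PySem.List.sorted words (fun w => w) false).Pairwise (fun a b => a ≤ b) := by
    simpa using PySem.List.sorted_pairwise words (fun w => w)
  rw [adjScan_sorted _ hpw]
  congr 1
  exact decide_eq_decide.2 hperm.nodup_iff

-- ===== VERDICT (by name: the statement is the Claim_ definition above) =====
theorem has_duplicate_word_spec : Claim_equal_has_duplicate_word := by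
  intro grid _ hpre
  show has_duplicate_word grid = has_duplicate_word_alt grid
  by_cases h1 : (grid.map (fun row => PySem.Str.join "" row)).Nodup
  · have h2 : ∀ r ∈ grid, grid.length ≤ r.length := by
      rcases hpre with hd | hl
      · exact absurd h1 hd
      · exact hl
    show (if (hdwLoop (grid.map (fun row => PySem.Str.join "" row)) PySem.Set.empty).1 then true
       else (hdwLoop ((PySem.List.pyRange 0 (grid.length : Int) 1).map (fun c =>
          PySem.Str.join "" ((PySem.List.pyRange 0 (grid.length : Int) 1).map (fun ri =>
            PySem.List.pyGetD (PySem.List.pyGetD grid ri []) c ""))))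
          (hdwLoop (grid.map (fun row => PySem.Str.join "" row)) PySem.Set.empty).2).1) = _
    rw [cols_eq grid h2, A_eq]
    exact (B_eq _).symm
  · have hAt : (hdwLoop (grid.map (fun row => PySem.Str.join "" row)) PySem.Set.empty).1 = true := by
      rw [hdwLoop_fst]
      simp [PySem.Set.empty, h1]
    have hwords : ¬ ((grid.map (fun row => PySem.Str.join "" row)) ++ (zipStarJoin grid).take grid.length).Nodup :=
      fun hn => h1 (List.nodup_append.1 hn).1
    show (if (hdwLoop (grid.map (fun row => PySem.Str.join "" row)) PySem.Set.empty).1 then true else _) = _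
    rw [hAt]
    simp only [if_true]
    have := B_eq ((grid.map (fun r => PySem.Str.join "" r)) ++ (zipStarJoin grid).take grid.length)
    rw [show has_duplicate_word_alt grid =
        adjScan ((PySem.List.sorted ((grid.map (fun r => PySem.Str.join "" r)) ++ (zipStarJoin grid).take grid.length) (fun w => w) false).zip
          ((PySem.List.sorted ((grid.map (fun r => PySem.Str.join "" r)) ++ (zipStarJoin grid).take grid.length) (fun w => w) false).drop 1)) from rfl,
        this]
    simp [hwords]
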